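-- pv_equiv track=rewrite | github.com/history26/lesson-s-projects | sm3 rho method/main.py | GG
-- ===== SOURCE A (Python) =====
-- def inttobin(x,k):#将十进制整型变量转化为k位二进制字符串
--     x=bin(x)[2:]
--     t=k-len(x)
--     while t>0:
--         x='0'+x
--         t=t-1
--     return x
--
-- def GG(a,b,c,j):
--     if j<=15:
--         return a^b^c
--     else:
--         x=inttobin(a,32)
--         t=''
--         for i in x:
--             if i=='0':
--                 t=t+'1'
--             else:
--                 t=t+'0'
--         return (a&b)|((int(t,2))&c)
-- ===== SOURCE B (Python) =====
-- def GG(a, b, c, j):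
--     if j <= 15:
--         return a ^ b ^ c
--     return (a & b) | ((0xFFFFFFFF - a) & c)
-- ===== Notes on version B (the rewrite author's own statement) =====
-- stated objective: simpler
-- what changed: Replaces the bin()-string conversion, zero-padding while-loop, per-character flip loop and int(t,2) re-parse with a single closed-form 32-bit arithmetic complement 0xFFFFFFFF - a.
-- outside the precondition, e.g. on GG(-2, 0, 8, 16): A returns 8, B returns 0
import Mathlib
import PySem

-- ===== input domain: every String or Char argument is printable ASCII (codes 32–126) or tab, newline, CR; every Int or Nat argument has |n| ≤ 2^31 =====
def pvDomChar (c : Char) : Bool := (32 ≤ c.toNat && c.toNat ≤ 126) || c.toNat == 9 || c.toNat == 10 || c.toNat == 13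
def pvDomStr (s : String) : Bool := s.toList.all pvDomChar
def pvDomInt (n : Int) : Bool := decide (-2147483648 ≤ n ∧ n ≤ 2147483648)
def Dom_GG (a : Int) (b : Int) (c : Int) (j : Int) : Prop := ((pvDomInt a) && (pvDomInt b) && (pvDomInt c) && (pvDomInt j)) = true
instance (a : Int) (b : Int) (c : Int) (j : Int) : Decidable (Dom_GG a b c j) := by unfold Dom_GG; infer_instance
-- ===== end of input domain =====

-- B replaces A's bin()-string padding/flip loops by the closed-form 32-bit complement 0xFFFFFFFF - a (simpler).
-- Return-value equivalence only; neither program mutates anything.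

-- ===== PORT A =====
-- digits of bin(n) after the '0b' prefix for n>0, MSB first (empty for 0); the first (fuel)
-- argument only bounds the recursion depth so the recursion is structural ((n+1)/2 ≤ n ≤ fuel)
def binAuxGo : Nat → Nat → List Char
  | _, 0 => []
  | 0, _+1 => []
  | f+1, n+1 => binAuxGo f ((n+1)/2) ++ [if (n+1) % 2 = 1 then '1' else '0']

def binAux (n : Nat) : List Char := binAuxGo n n

-- bin(x)[2:] : for x<0, bin(x) = "-0b…" so [2:] starts with the char 'b'
def pyBinTail (x : Int) : List Char :=
  if x < 0 then 'b' :: binAux (-x).toNat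
  else if x = 0 then ['0'] else binAux x.toNat

-- the `while t>0: x='0'+x; t=t-1` loop ( .toNat clamps t≤0 to no iterations, exactly the while)
def padLoop : Nat → List Char → List Char
  | 0, s => s
  | t+1, s => padLoop t ('0' :: s)

def inttobin (x : Int) (k : Int) : List Char :=
  let s := pyBinTail x
  padLoop (k - (s.length : Int)).toNat s

-- the `t=''; for i in x: t = t + ('1' if i=='0' else '0')` loop
def flipLoop (x : List Char) : List Char :=
  x.foldl (fun t i => t ++ [if i = '0' then '1' else '0']) []

-- int(t,2); exact here because t consists only of '0'/'1' characters
def parse2 (t : List Char) : Int :=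
  t.foldl (fun acc c => 2*acc + (if c = '1' then 1 else 0)) 0

def GG (a : Int) (b : Int) (c : Int) (j : Int) : Int :=
  if j ≤ 15 then Int.xor (Int.xor a b) c
  else
    let x := inttobin a 32
    let t := flipLoop x
    Int.lor (Int.land a b) (Int.land (parse2 t) c)

-- ===== PORT B =====
def GG_alt (a : Int) (b : Int) (c : Int) (j : Int) : Int :=
  if j ≤ 15 then Int.xor (Int.xor a b) c
  else Int.lor (Int.land a b) (Int.land (4294967295 - a) c)

-- ===== PRECONDITION & SPEC =====
-- Pre_ excludes only the boolean branch (j>15) applied to a negative first word: GG is SM3's boolean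
-- function on 32-bit words, and there A's bin(a)[2:] keeps the 'b' of '-0b' as a bogus binary digit —
-- an accident of the string trick that no clean complement reproduces; B returns the ordinary
-- 32-bit-complement value instead (e.g. at (-2,0,8,16) A returns 8, B returns 0).
def Pre_GG (a : Int) (b : Int) (c : Int) (j : Int) : Prop := 15 < j → 0 ≤ a
instance (a : Int) (b : Int) (c : Int) (j : Int) : Decidable (Pre_GG a b c j) := by unfold Pre_GG; infer_instance

def pvWitness_GG : Int × Int × Int × Int := (5, 6, 7, 20)

def Spec_GG (a : Int) (b : Int) (c : Int) (j : Int) (out : Int) : Prop := out = GG_alt a b c j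
instance (a : Int) (b : Int) (c : Int) (j : Int) (out : Int) : Decidable (Spec_GG a b c j out) := by unfold Spec_GG; infer_instance

-- ===== CLAIM (what is proved, stated in full; the proofs are below) =====
def Claim_equal_GG : Prop := ∀ (a : Int) (b : Int) (c : Int) (j : Int), Dom_GG a b c j → Pre_GG a b c j → Spec_GG a b c j (GG a b c j)

-- ===== LEMMAS AND PROOFS =====

def isBits (l : List Char) : Prop := ∀ c ∈ l, c = '0' ∨ c = '1'

theorem parse2_foldl_acc (l : List Char) (acc : Int) :
    l.foldl (fun acc c => 2*acc + (if c = '1' then 1 else 0)) acc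
      = acc * 2 ^ l.length + parse2 l := by
  induction l generalizing acc with
  | nil => simp [parse2]
  | cons c l ih =>
    simp only [List.foldl_cons, List.length_cons, parse2] at *
    rw [ih, ih (2*0 + _)]
    ring

theorem parse2_cons (c : Char) (l : List Char) :
    parse2 (c :: l) = (if c = '1' then 1 else 0) * 2 ^ l.length + parse2 l := by
  simp only [parse2, List.foldl_cons]
  rw [parse2_foldl_acc]
  unfold parse2
  ring

theorem parse2_append_single (l : List Char) (c : Char) :
    parse2 (l ++ [c]) = 2 * parse2 l + (if c = '1' then 1 else 0) := by
  simp [parse2, List.foldl_append]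

theorem flipLoop_eq_map (x : List Char) :
    flipLoop x = x.map (fun i => if i = '0' then '1' else '0') := by
  suffices h : ∀ s, x.foldl (fun t i => t ++ [if i = '0' then '1' else '0']) s
      = s ++ x.map (fun i => if i = '0' then '1' else '0') by
    simpa [flipLoop] using h []
  induction x with
  | nil => simp
  | cons c l ih => intro s; simp [ih]

theorem flip_sum (l : List Char) (hb : isBits l) :
    parse2 (l.map (fun i => if i = '0' then '1' else '0')) + parse2 l = 2 ^ l.length - 1 := by
  induction l with
  | nil => simp [parse2]
  | cons c l ih =>
    have hc : c = '0' ∨ c = '1' := hb c (List.mem_cons_self ..)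
    have ht : isBits l := fun x hx => hb x (List.mem_cons_of_mem _ hx)
    have := ih ht
    rcases hc with h | h <;> subst h <;>
      simp [parse2_cons, pow_succ] <;> omega

theorem padLoop_eq (p : Nat) (s : List Char) :
    padLoop p s = List.replicate p '0' ++ s := by
  induction p generalizing s with
  | zero => simp [padLoop]
  | succ p ih => simp [padLoop, ih, List.replicate_succ']

theorem parse2_zeros (p : Nat) (s : List Char) :
    parse2 (List.replicate p '0' ++ s) = parse2 s := by
  induction p with
  | zero => simp
  | succ p ih => simpa [List.replicate_succ, parse2_cons] using ih

theorem binAuxGo_parse (n : Nat) : ∀ f : Nat, n ≤ f → parse2 (binAuxGo f n) = (n : Int) := by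
  induction n using Nat.strong_induction_on with
  | _ n ih =>
    intro f hf
    match n, f with
    | 0, f => simp [binAuxGo, parse2]
    | m+1, f+1 =>
      rw [show binAuxGo (f+1) (m+1)
            = binAuxGo f ((m+1)/2) ++ [if (m+1) % 2 = 1 then '1' else '0'] from rfl]
      rw [parse2_append_single,
        ih ((m+1)/2) (Nat.div_lt_self (Nat.succ_pos m) (by norm_num)) f (by omega)]
      have h2 : (m+1) % 2 = 1 ∨ (m+1) % 2 = 0 := by omega
      have := Nat.div_add_mod (m+1) 2
      rcases h2 with h | h <;> simp [h] <;> push_cast <;> omega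

theorem binAuxGo_bits (n : Nat) : ∀ f : Nat, isBits (binAuxGo f n) := by
  induction n using Nat.strong_induction_on with
  | _ n ih =>
    intro f
    match n, f with
    | 0, f => intro c hc; simp [binAuxGo] at hc
    | m+1, 0 => intro c hc; simp [binAuxGo] at hc
    | m+1, f+1 =>
      intro c hc
      simp only [binAuxGo] at hc
      rcases List.mem_append.mp hc with h | h
      · exact ih ((m+1)/2) (Nat.div_lt_self (Nat.succ_pos m) (by norm_num)) f c h
      · simp only [List.mem_singleton] at h
        subst h; split <;> simp

theorem binAuxGo_len (k : Nat) : ∀ (n f : Nat), n < 2 ^ k → (binAuxGo f n).length ≤ k := by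
  induction k with
  | zero => intro n f hn; interval_cases n; simp [binAuxGo]
  | succ k ih =>
    intro n f hn
    match n, f with
    | 0, f => simp [binAuxGo]
    | m+1, 0 => simp [binAuxGo]
    | m+1, f+1 =>
      have hd : (m+1)/2 < 2 ^ k := Nat.div_lt_of_lt_mul (by rw [pow_succ] at hn; omega)
      have := ih ((m+1)/2) f hd
      simp only [binAuxGo, List.length_append, List.length_cons, List.length_nil]
      omega

theorem pyBinTail_spec (a : Int) (h0 : 0 ≤ a) (h1 : a ≤ 2147483648) :
    parse2 (pyBinTail a) = a ∧ isBits (pyBinTail a) ∧ (pyBinTail a).length ≤ 32 := by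
  unfold pyBinTail
  rw [if_neg (by omega)]
  by_cases hz : a = 0
  · subst hz
    refine ⟨by simp [parse2], ?_, by simp⟩
    intro c hc; simp at hc; simp [hc]
  · rw [if_neg hz]
    have hn : a.toNat < 2 ^ 32 := by omega
    refine ⟨?_, binAuxGo_bits _ _, binAuxGo_len 32 _ _ hn⟩
    rw [binAux, binAuxGo_parse a.toNat a.toNat le_rfl]
    omega

theorem GG_eq_alt (a b c j : Int) (hj : ¬ j ≤ 15) (h0 : 0 ≤ a) (h1 : a ≤ 2147483648) :
    GG a b c j = GG_alt a b c j := by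
  obtain ⟨hp, hb, hl⟩ := pyBinTail_spec a h0 h1
  unfold GG GG_alt
  rw [if_neg hj, if_neg hj]
  show Int.lor (Int.land a b) (Int.land (parse2 (flipLoop (padLoop ((32 : Int) - ((pyBinTail a).length : Int)).toNat (pyBinTail a)))) c)
      = Int.lor (Int.land a b) (Int.land (4294967295 - a) c)
  have hlen : ((32 : Int) - ((pyBinTail a).length : Int)).toNat = 32 - (pyBinTail a).length := by
    omega
  rw [hlen, padLoop_eq, flipLoop_eq_map]
  set s := pyBinTail a with hs
  have hbits : isBits (List.replicate (32 - s.length) '0' ++ s) := by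
    intro x hx
    rcases List.mem_append.mp hx with h | h
    · left; exact List.eq_of_mem_replicate h
    · exact hb x h
  have hflen : (List.replicate (32 - s.length) '0' ++ s).length = 32 := by
    simp only [List.length_append, List.length_replicate]
    omega
  have hsum := flip_sum _ hbits
  rw [hflen, parse2_zeros] at hsum
  have : parse2 ((List.replicate (32 - s.length) '0' ++ s).map
      (fun i => if i = '0' then '1' else '0')) = 4294967295 - a := by
    rw [hp] at hsum
    norm_num at hsum ⊢
    omega
  rw [this]

-- ===== VERDICT (by name: the statement is the Claim_ definition above) =====
theorem GG_spec : Claim_equal_GG := by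
  intro a b c j hdom hpre
  show GG a b c j = GG_alt a b c j
  by_cases hj : j ≤ 15
  · unfold GG GG_alt; rw [if_pos hj, if_pos hj]
  · have ha : 0 ≤ a := hpre (by omega)
    have h1 : a ≤ 2147483648 := by
      unfold Dom_GG pvDomInt at hdom
      simp only [Bool.and_eq_true, decide_eq_true_eq] at hdom
      exact hdom.1.1.1.2
    exact GG_eq_alt a b c j hj ha h1
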